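-- pv_equiv track=rewrite | github.com/park-hg/swjungle-algorithm-study | Programmers-최고의집합/Son0-0.py | solution
-- ===== SOURCE A (Python) =====
-- def solution(n, s):
--     if (s // n) == 0: return [-1]
--     num = s // n
--     answer = [num for _ in range(n)]
--     if (s % n) != 0:
--         temp = (s % n)
--         for idx in range(n):
--             if temp == 0:
--                 break
--             answer[idx] += 1
--             temp -= 1
--         return sorted(answer)
--     else:
--         return answer
-- ===== SOURCE B (Python) =====
-- def solution(n, s):
--     if s // n == 0:
--         return [-1]
--     return [(s + i) // n for i in range(n)]
-- ===== Notes on version B (the rewrite author's own statement) =====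
-- stated objective: alternative
-- what changed: B replaces A's fill-then-increment mutation loop plus sorted() with a single comprehension computing each element independently by the per-index closed form (s + i) // n, which is s//n for i < n - s%n and s//n + 1 afterwards, so the result comes out sorted with no mutation and no sort.
import Mathlib
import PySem

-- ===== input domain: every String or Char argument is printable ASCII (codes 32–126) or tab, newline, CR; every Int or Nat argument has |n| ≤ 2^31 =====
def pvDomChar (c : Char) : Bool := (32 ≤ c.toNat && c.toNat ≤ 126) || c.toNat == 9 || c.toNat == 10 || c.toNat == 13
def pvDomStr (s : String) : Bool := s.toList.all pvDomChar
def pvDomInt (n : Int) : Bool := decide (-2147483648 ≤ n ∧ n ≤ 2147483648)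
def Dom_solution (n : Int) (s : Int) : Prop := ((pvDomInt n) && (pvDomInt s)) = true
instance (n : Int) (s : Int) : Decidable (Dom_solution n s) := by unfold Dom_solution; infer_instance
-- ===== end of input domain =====

-- B computes each element directly by the per-index formula (s + i) // n
-- (one comprehension, no mutation loop, no sort), replacing A's
-- fill + increment-first-r-entries loop followed by sorted().

-- ===== PORT A =====
-- the 'for idx in range(n): if temp == 0: break; answer[idx] += 1; temp -= 1' loop;
-- idx always lies in range of 'answer' (len n), so getD/set at idx.toNat is exact here
def solLoopA (idxs : List Int) (answer : List Int) (temp : Int) : List Int :=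
  match idxs with
  | [] => answer
  | idx :: rest =>
    if temp = 0 then answer
    else solLoopA rest (answer.set idx.toNat (answer.getD idx.toNat 0 + 1)) (temp - 1)

def solution (n : Int) (s : Int) : List Int :=
  if PySem.Int.floordiv s n = 0 then [-1]
  else
    let num := PySem.Int.floordiv s n
    let answer := (PySem.List.pyRange 0 n 1).map (fun _ => num)
    if PySem.Int.mod s n ≠ 0 then
      PySem.List.sorted (solLoopA (PySem.List.pyRange 0 n 1) answer (PySem.Int.mod s n)) (fun x => x) false
    else
      answer

-- ===== PORT B =====
def solution_alt (n : Int) (s : Int) : List Int :=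
  if PySem.Int.floordiv s n = 0 then [-1]
  else (PySem.List.pyRange 0 n 1).map (fun i => PySem.Int.floordiv (s + i) n)

-- ===== PRECONDITION & SPEC =====
-- Pre_ excludes exactly n = 0, where Python's s // n raises ZeroDivisionError.
def Pre_solution (n : Int) (s : Int) : Prop := n ≠ 0
instance (n : Int) (s : Int) : Decidable (Pre_solution n s) := by unfold Pre_solution; infer_instance
def pvWitness_solution : Int × Int := (3, 7)

def Spec_solution (n : Int) (s : Int) (out : List Int) : Prop := out = solution_alt n s
instance (n : Int) (s : Int) (out : List Int) : Decidable (Spec_solution n s out) := by unfold Spec_solution; infer_instance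

-- ===== CLAIM (what is proved, stated in full; the proofs are below) =====
def Claim_equal_solution : Prop := ∀ (n : Int) (s : Int), Dom_solution n s → Pre_solution n s → Spec_solution n s (solution n s)

-- ===== LEMMAS AND PROOFS =====

lemma map_const_eq_replicate {α β : Type} (xs : List α) (c : β) :
    xs.map (fun _ => c) = List.replicate xs.length c := by
  induction xs with
  | nil => rfl
  | cons x t ih => simp [List.replicate_succ, ih]

-- the loop turns the first r copies of q into q+1
lemma solLoopA_spec (q : Int) : ∀ (r m i : Nat) (P : List Int), P.length = i → r ≤ m →
    solLoopA (PySem.List.pyRange (i : Int) ((i : Int) + (m : Nat)) 1) (P ++ List.replicate m q) (r : Nat)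
      = P ++ List.replicate r (q + 1) ++ List.replicate (m - r) q := by
  intro r
  induction r with
  | zero =>
    intro m i P hP hrm
    cases h : PySem.List.pyRange (i : Int) ((i : Int) + (m : Nat)) 1 with
    | nil => simp [solLoopA]
    | cons a t => simp [solLoopA]
  | succ r ih =>
    intro m i P hP hrm
    obtain ⟨m', rfl⟩ : ∃ m', m = m' + 1 := ⟨m - 1, by omega⟩
    rw [PySem.List.pyRange_one_cons (by push_cast; omega)]
    have hget : (P ++ List.replicate (m' + 1) q).getD (Int.toNat (i : Int)) 0 = q := by
      simp [hP, List.replicate_succ, List.getD]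
    have hset : (P ++ List.replicate (m' + 1) q).set (Int.toNat (i : Int)) (q + 1)
        = (P ++ [q + 1]) ++ List.replicate m' q := by
      simp [hP, List.replicate_succ, List.append_assoc]
    rw [show ((↑r + 1 : Nat) : Int) = ((r : Nat) : Int) + 1 by push_cast; ring]
    simp only [solLoopA, if_neg (by omega : ¬ ((r : Nat) : Int) + 1 = 0)]
    rw [hget, hset]
    rw [show ((r : Nat) : Int) + 1 - 1 = ((r : Nat) : Int) by ring]
    have := ih m' (i + 1) (P ++ [q + 1]) (by simp [hP]) (by omega)
    rw [show (i : Int) + ((m' + 1 : Nat) : Int) = ((i + 1 : Nat) : Int) + ((m' : Nat) : Int) by push_cast; ring,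
        show ((i : Int) + 1) = ((i + 1 : Nat) : Int) by push_cast; ring, this]
    simp [List.replicate_succ, List.append_assoc]

lemma pairwise_two_blocks (q : Int) (a b : Nat) :
    (List.replicate a q ++ List.replicate b (q + 1)).Pairwise (· ≤ ·) := by
  apply List.pairwise_append.2
  refine ⟨List.pairwise_replicate.2 (Or.inr le_rfl), List.pairwise_replicate.2 (Or.inr le_rfl), ?_⟩
  · intro x hx y hy
    rw [List.eq_of_mem_replicate hx, List.eq_of_mem_replicate hy]
    omega

-- a range mapped through a threshold-ite is two replicate blocks
lemma range_map_ite (a b : Nat) (q q' : Int) :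
    (List.range (a + b)).map (fun k => if k < a then q else q')
      = List.replicate a q ++ List.replicate b q' := by
  rw [List.range_add, List.map_append, List.map_map]
  congr 1
  · rw [List.map_congr_left (fun k hk => if_pos (List.mem_range.1 hk)),
        map_const_eq_replicate, List.length_range]
  · rw [show ((fun k => if k < a then q else q') ∘ (a + ·))
          = fun (k : Nat) => q' by funext k; simp]
    rw [map_const_eq_replicate, List.length_range]

-- per-index formula: (s + k) // n is q for k < n - r and q + 1 afterwards
lemma floordiv_shift (n s : Int) (hn : 0 < n) (k : Nat) (hk : (k : Int) < n) :
    PySem.Int.floordiv (s + k) n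
      = if (k : Int) < n - PySem.Int.mod s n then PySem.Int.floordiv s n
        else PySem.Int.floordiv s n + 1 := by
  have hs := PySem.Int.floordiv_mul_add_mod s n
  have hr0 := PySem.Int.mod_nonneg s hn
  have hrn := PySem.Int.mod_lt s hn
  set q := PySem.Int.floordiv s n
  set r := PySem.Int.mod s n
  split_ifs with h
  · rw [PySem.Int.floordiv_eq_iff_of_pos hn]
    constructor <;> nlinarith
  · rw [PySem.Int.floordiv_eq_iff_of_pos hn]
    constructor <;> nlinarith

-- B's comprehension equals the two sorted blocks
lemma alt_blocks (n s : Int) (hn : 0 < n) :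
    (PySem.List.pyRange 0 n 1).map (fun i => PySem.Int.floordiv (s + i) n)
      = List.replicate (n - PySem.Int.mod s n).toNat (PySem.Int.floordiv s n)
        ++ List.replicate (PySem.Int.mod s n).toNat (PySem.Int.floordiv s n + 1) := by
  have hr0 := PySem.Int.mod_nonneg s hn
  have hrn := PySem.Int.mod_lt s hn
  rw [PySem.List.pyRange_one, List.map_map]
  have hsplit : (n - 0).toNat = (n - PySem.Int.mod s n).toNat + (PySem.Int.mod s n).toNat := by
    omega
  rw [hsplit, ← range_map_ite]
  apply List.map_congr_left
  intro k hk
  rw [List.mem_range] at hk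
  simp only [Function.comp, zero_add]
  rw [floordiv_shift n s hn k (by omega)]
  congr 1
  simp only [eq_iff_iff]
  omega

-- ===== VERDICT (by name: the statement is the Claim_ definition above) =====
theorem solution_spec : Claim_equal_solution := by
  intro n s _hd hn
  unfold Spec_solution solution solution_alt
  by_cases hq : PySem.Int.floordiv s n = 0
  · simp [hq]
  · simp only [if_neg hq]
    set q := PySem.Int.floordiv s n with hqdef
    set r := PySem.Int.mod s n with hrdef
    rcases lt_or_gt_of_ne hn with hneg | hpos
    · -- n < 0: range(n) is empty on both sides
      have hrange : PySem.List.pyRange 0 n 1 = [] :=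
        PySem.List.pyRange_one_eq_nil (by omega)
      by_cases hr : r = 0 <;> simp [hrange, hr, solLoopA, PySem.List.sorted]
    · -- n > 0
      have hr0 : 0 ≤ r := PySem.Int.mod_nonneg s hpos
      have hrn : r < n := PySem.Int.mod_lt s hpos
      have hB := alt_blocks n s hpos
      rw [← hrdef, ← hqdef] at hB
      have hmap : (PySem.List.pyRange 0 n 1).map (fun _ => q) = List.replicate n.toNat q := by
        rw [map_const_eq_replicate, PySem.List.length_pyRange_one]
        norm_num
      by_cases hr : r = 0
      · rw [hB]
        simp [hr, hmap]
      · simp only [hmap, ne_eq, hr, not_false_eq_true, if_true]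
        have hloop := solLoopA_spec q r.toNat n.toNat 0 []
          (by simp) (by omega)
        rw [show ((0 : Nat) : Int) = 0 by norm_num,
            show (0 : Int) + ((n.toNat : Nat) : Int) = n by omega,
            show ((r.toNat : Nat) : Int) = r by omega] at hloop
        simp only [List.nil_append] at hloop
        rw [hloop]
        rw [PySem.List.sorted_id_eq_of_perm_of_pairwise _
              (List.replicate (n.toNat - r.toNat) q ++ List.replicate r.toNat (q + 1))
              List.perm_append_comm (pairwise_two_blocks q _ _)]
        rw [hB, show (n - r).toNat = n.toNat - r.toNat by omega]
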